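-- pv_equiv track=rewrite | github.com/edonyzpc/tiya | src/envfile.py | format_env_value
-- ===== SOURCE A (Python) =====
-- def format_env_value(value: str) -> str:
--     if value == "":
--         return '""'
--     needs_quotes = any(ch.isspace() for ch in value) or "#" in value or '"' in value or "'" in value
--     if not needs_quotes:
--         return value
--     escaped = value.replace("\\", "\\\\").replace('"', '\\"')
--     return f'"{escaped}"'
-- ===== SOURCE B (Python) =====
-- def format_env_value(value: str) -> str:
--     if value == "":
--         return '""'
--     escaped = []
--     needs_quotes = False
--     for ch in value:
--         if ch == "\\":
--             escaped.append("\\\\")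
--         elif ch == '"':
--             escaped.append('\\"')
--         else:
--             escaped.append(ch)
--         needs_quotes = needs_quotes or ch.isspace() or ch in "#\"'"
--     if not needs_quotes:
--         return value
--     return '"' + "".join(escaped) + '"'
-- ===== Notes on version B (the rewrite author's own statement) =====
-- stated objective: alternative
-- what changed: Replaces A's five separate scans (any-generator, three substring tests, two chained replaces) with a single pass that builds the escaped buffer and the needs-quotes flag together.
import Mathlib
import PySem

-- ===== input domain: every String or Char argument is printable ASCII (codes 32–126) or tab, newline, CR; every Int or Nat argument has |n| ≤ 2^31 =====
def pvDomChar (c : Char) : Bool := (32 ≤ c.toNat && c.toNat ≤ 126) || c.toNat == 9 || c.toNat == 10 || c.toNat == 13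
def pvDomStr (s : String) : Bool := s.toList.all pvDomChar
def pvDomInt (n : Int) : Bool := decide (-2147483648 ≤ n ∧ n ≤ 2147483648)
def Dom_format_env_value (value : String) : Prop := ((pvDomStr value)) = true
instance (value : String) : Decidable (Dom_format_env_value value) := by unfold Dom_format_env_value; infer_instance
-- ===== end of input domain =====

-- B: one pass building the escaped buffer and needs-quotes flag together, instead of A's separate scans (objective: alternative).
-- ===== PORT A =====
def format_env_value (value : String) : String :=
  if value = "" then "\"\""
  else
    let needs_quotes :=
      value.toList.any PySem.Chars.isspace || PySem.Str.isIn "#" value ||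
        PySem.Str.isIn "\"" value || PySem.Str.isIn "'" value
    if !needs_quotes then value
    else
      let escaped := PySem.Str.replace (PySem.Str.replace value "\\" "\\\\") "\"" "\\\""
      -- f'"{escaped}"' built as the explicit char list (exact: string concatenation)
      String.ofList ('"' :: escaped.toList ++ ['"'])

-- ===== PORT B =====
def format_env_value_alt (value : String) : String :=
  if value = "" then "\"\""
  else
    let r := value.toList.foldl
      (fun (p : List Char × Bool) c =>
        (p.1 ++ (if c == '\\' then ['\\', '\\'] else if c == '"' then ['\\', '"'] else [c]),
         p.2 || (PySem.Chars.isspace c || c == '#' || c == '"' || c == '\'')))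
      ([], false)
    if !r.2 then value
    else String.ofList ('"' :: r.1 ++ ['"'])

-- ===== PRECONDITION & SPEC =====
def Spec_format_env_value (value : String) (out : String) : Prop := out = format_env_value_alt value
instance (value : String) (out : String) : Decidable (Spec_format_env_value value out) := by unfold Spec_format_env_value; infer_instance

-- ===== CLAIM =====
def Claim_equal_format_env_value : Prop := ∀ (value : String), Dom_format_env_value value → Spec_format_env_value value (format_env_value value)

-- ===== LEMMAS AND PROOFS =====

lemma go_singleton (a : Char) (new : List Char) :
    ∀ (l : List Char) (fuel : Nat) (acc : List Char), l.length ≤ fuel →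
      PySem.Chars.replace.go [a] new fuel l acc
        = acc.reverse ++ l.flatMap (fun c => if c == a then new else [c]) := by
  intro l
  induction l with
  | nil =>
      intro fuel acc h
      cases fuel <;> simp [PySem.Chars.replace.go]
  | cons c t ih =>
      intro fuel acc h
      cases fuel with
      | zero => simp at h
      | succ n =>
        simp only [PySem.Chars.replace.go]
        by_cases hc : c = a
        · subst hc
          simp [List.isPrefixOf, ih n _ (by simpa using h)]
        · simp [List.isPrefixOf, Ne.symm hc, hc, ih n _ (by simpa using h)]

lemma replace_singleton (s : List Char) (a : Char) (new : List Char) :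
    PySem.Chars.replace s [a] new = s.flatMap (fun c => if c == a then new else [c]) := by
  simp [PySem.Chars.replace, go_singleton]

lemma flatMap_compose (s : List Char) :
    (s.flatMap (fun c => if c == '\\' then ['\\', '\\'] else [c])).flatMap
        (fun c => if c == '"' then ['\\', '"'] else [c])
      = s.flatMap (fun c => if c == '\\' then ['\\', '\\'] else if c == '"' then ['\\', '"'] else [c]) := by
  induction s with
  | nil => simp
  | cons c t ih =>
      simp only [beq_iff_eq] at ih ⊢
      by_cases h1 : c = '\\'
      · subst h1; simp [ih]
      · by_cases h2 : c = '"'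
        · subst h2; simp [ih]
        · simp [h1, h2, ih]

lemma singleton_infix_iff (a : Char) (l : List Char) : [a] <:+: l ↔ a ∈ l := by
  constructor
  · intro h; exact h.mem (by simp)
  · intro h
    obtain ⟨s, t, rfl⟩ := List.append_of_mem h
    exact ⟨s, t, by simp⟩

lemma needs_eq (l : List Char) :
    (l.any PySem.Chars.isspace || PySem.Chars.isIn ['#'] l || PySem.Chars.isIn ['"'] l
        || PySem.Chars.isIn ['\''] l)
      = l.any (fun c => PySem.Chars.isspace c || c == '#' || c == '"' || c == '\'') := by
  rw [Bool.eq_iff_iff]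
  simp only [Bool.or_eq_true, List.any_eq_true, PySem.Chars.isIn_iff_infix, singleton_infix_iff,
    beq_iff_eq]
  constructor
  · rintro (((⟨x, hx, hs⟩ | h) | h) | h)
    exacts [⟨x, hx, Or.inl (Or.inl (Or.inl hs))⟩, ⟨'#', h, by simp⟩, ⟨'"', h, by simp⟩,
      ⟨'\'', h, by simp⟩]
  · rintro ⟨x, hx, ((hs | rfl) | rfl) | rfl⟩
    exacts [Or.inl (Or.inl (Or.inl ⟨x, hx, hs⟩)), Or.inl (Or.inl (Or.inr hx)), Or.inl (Or.inr hx),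
      Or.inr hx]

lemma fold_spec (l : List Char) :
    ∀ (acc : List Char) (b : Bool),
      l.foldl (fun (p : List Char × Bool) c =>
        (p.1 ++ (if c == '\\' then ['\\', '\\'] else if c == '"' then ['\\', '"'] else [c]),
         p.2 || (PySem.Chars.isspace c || c == '#' || c == '"' || c == '\''))) (acc, b)
      = (acc ++ l.flatMap (fun c => if c == '\\' then ['\\', '\\'] else if c == '"' then ['\\', '"'] else [c]),
         b || l.any (fun c => PySem.Chars.isspace c || c == '#' || c == '"' || c == '\'')) := by
  induction l with
  | nil => simp
  | cons c t ih =>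
      intro acc b
      rw [List.foldl_cons, ih]
      simp [List.append_assoc, Bool.or_assoc]

lemma ports_eq (value : String) : format_env_value value = format_env_value_alt value := by
  unfold format_env_value format_env_value_alt
  by_cases hv : value = ""
  · simp [hv]
  · simp only [hv, if_false, fold_spec, List.nil_append, Bool.false_or]
    rw [show (PySem.Str.isIn "#" value) = PySem.Chars.isIn ['#'] value.toList from by
          simp [PySem.Str.isIn]]
    rw [show (PySem.Str.isIn "\"" value) = PySem.Chars.isIn ['"'] value.toList from by
          simp [PySem.Str.isIn]]
    rw [show (PySem.Str.isIn "'" value) = PySem.Chars.isIn ['\''] value.toList from by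
          simp [PySem.Str.isIn]]
    rw [needs_eq]
    rcases h : value.toList.any
        (fun c => PySem.Chars.isspace c || c == '#' || c == '"' || c == '\'') with _ | _
    · simp
    · simp only [Bool.not_true, Bool.false_eq_true, if_false]
      refine congrArg String.ofList ?_
      rw [show (PySem.Str.replace (PySem.Str.replace value "\\" "\\\\") "\"" "\\\"").toList
            = PySem.Chars.replace (PySem.Chars.replace value.toList "\\".toList "\\\\".toList)
                "\"".toList "\\\"".toList from by
          simp [PySem.Str.toList_replace]]
      rw [show ("\\".toList : List Char) = ['\\'] from rfl,
          show ("\\\\".toList : List Char) = ['\\', '\\'] from rfl,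
          show ("\"".toList : List Char) = ['"'] from rfl,
          show ("\\\"".toList : List Char) = ['\\', '"'] from rfl]
      rw [replace_singleton, replace_singleton, flatMap_compose]

-- ===== VERDICT =====
theorem format_env_value_spec : Claim_equal_format_env_value := by
  intro value _
  unfold Spec_format_env_value
  exact ports_eq value
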